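-- pv_equiv track=rewrite | github.com/starthackHQ/Contextinator | src/contextinator/rag/tools/cat_file.py | _reconstruct_file
-- ===== SOURCE A (Python) =====
-- from typing import Dict, List, Optional
--
-- def _reconstruct_file(chunks: List[Dict]) -> str:
--     """Deduplicate and concatenate chunks, removing nested duplicates."""
--     if not chunks:
--         return ""
--
--     # Sort by start_line, then by length (longer first)
--     chunks.sort(key=lambda x: (int(x.get('start_line', 0)), -int(x.get('end_line', 0))))
--
--     # Remove chunks that are completely contained in other chunks
--     unique = []
--     for c in chunks:
--         c_start = int(c.get('start_line', 0))
--         c_end = int(c.get('end_line', 0))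
--
--         # Check if this chunk is contained in any already-kept chunk
--         is_contained = False
--         for kept in unique:
--             k_start = int(kept.get('start_line', 0))
--             k_end = int(kept.get('end_line', 0))
--
--             # If c is completely inside kept, skip it
--             if k_start <= c_start and c_end <= k_end and (k_start != c_start or k_end != c_end):
--                 is_contained = True
--                 break
--
--         if not is_contained:
--             unique.append(c)
--
--     # Concatenate with double newline between chunks
--     return '\n\n'.join(c.get('content', '').strip() for c in unique if c.get('content', '').strip())
-- ===== SOURCE B (Python) =====
-- def _reconstruct_file(chunks):
--     if not chunks:
--         return ""
--     # Same in-place sort as the original (mutates chunks, as A does).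
--     chunks.sort(key=lambda x: (int(x.get('start_line', 0)), -int(x.get('end_line', 0))))
--     # One pass: a chunk is strictly contained in an earlier (sorted) chunk iff
--     # max_end > e, or max_end == e and some chunk reaching max_end started earlier.
--     unique = []
--     max_end = None   # running max of end_line over processed chunks
--     min_start = None # min start_line among processed chunks achieving max_end
--     for c in chunks:
--         s = int(c.get('start_line', 0))
--         e = int(c.get('end_line', 0))
--         if max_end is None:
--             unique.append(c)
--             max_end, min_start = e, s
--         else:
--             contained = max_end > e or (max_end == e and min_start < s)
--             if not contained:
--                 unique.append(c)
--             if e > max_end: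
--                 max_end, min_start = e, s
--             elif e == max_end:
--                 min_start = min(min_start, s)
--     parts = []
--     for c in unique:
--         t = c.get('content', '').strip()
--         if t:
--             parts.append(t)
--     return '\n\n'.join(parts)
-- ===== Notes on version B (the rewrite author's own statement) =====
-- stated objective: faster
-- what changed: Replaced A's inner scan over all previously kept chunks (to test strict containment) by a single pass over the sorted list that keeps a running maximum end_line and the minimum start_line among chunks reaching it, deciding containment in O(1) per chunk.
import Mathlib
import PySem

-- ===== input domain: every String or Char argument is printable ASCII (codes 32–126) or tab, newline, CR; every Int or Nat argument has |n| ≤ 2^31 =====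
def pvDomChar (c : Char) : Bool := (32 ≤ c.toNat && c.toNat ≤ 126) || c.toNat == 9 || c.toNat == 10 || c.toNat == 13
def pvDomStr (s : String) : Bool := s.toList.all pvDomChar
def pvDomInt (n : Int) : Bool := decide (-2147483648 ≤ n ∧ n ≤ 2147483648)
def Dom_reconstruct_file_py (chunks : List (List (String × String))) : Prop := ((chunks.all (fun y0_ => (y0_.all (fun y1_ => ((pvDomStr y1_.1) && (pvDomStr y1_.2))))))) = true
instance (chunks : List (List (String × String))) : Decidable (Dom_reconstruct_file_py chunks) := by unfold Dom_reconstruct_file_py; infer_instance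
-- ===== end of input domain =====

-- B replaces A's quadratic scan of kept chunks by a single pass over the sorted list keeping a
-- running (max end_line, min start_line at that end); return-value equivalence only: both Pythons
-- sort `chunks` in place the same way.

-- shared field readers: both Pythons evaluate int(c.get(k, 0)) and c.get('content','').strip()
def pvGetInt (c : List (String × String)) (k : String) : Int :=
  match (PySem.Dict.mk c).get? k with
  | none => 0
  | some v => (PySem.Int.ofStr? v).getD 0      -- none (ValueError) is excluded by Pre_

def pvContent (c : List (String × String)) : String :=
  PySem.Str.strip ((PySem.Dict.mk c).getD "content" "")

-- both Pythons run chunks.sort(key=lambda x: (int(x.get('start_line',0)), -int(x.get('end_line',0))))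
def pvSortedChunks (chunks : List (List (String × String))) : List (List (String × String)) :=
  PySem.List.sorted2 chunks (fun x => pvGetInt x "start_line") (fun x => -(pvGetInt x "end_line"))

-- ===== PORT A =====
def pvStepA (u : List (List (String × String))) (c : List (String × String)) :
    List (List (String × String)) :=
  let cs := pvGetInt c "start_line"
  let ce := pvGetInt c "end_line"
  let isContained := u.any (fun kept =>
    let ks := pvGetInt kept "start_line"
    let ke := pvGetInt kept "end_line"
    decide (ks ≤ cs ∧ ce ≤ ke ∧ (ks ≠ cs ∨ ke ≠ ce)))
  if isContained then u else u ++ [c]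

def reconstruct_file_py (chunks : List (List (String × String))) : String :=
  if chunks = [] then ""
  else
    let unique := (pvSortedChunks chunks).foldl pvStepA []
    PySem.Str.join "\n\n" ((unique.map pvContent).filter (fun s => decide (s ≠ "")))

-- ===== PORT B =====
def pvStepB (st : List (List (String × String)) × Option (Int × Int))
    (c : List (String × String)) : List (List (String × String)) × Option (Int × Int) :=
  let cs := pvGetInt c "start_line"
  let ce := pvGetInt c "end_line"
  match st.2 with
  | none => (st.1 ++ [c], some (ce, cs))
  | some (M, S) =>
    let contained := decide (M > ce ∨ (M = ce ∧ S < cs))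
    ((if contained then st.1 else st.1 ++ [c]),
     some (if M < ce then (ce, cs) else if ce = M then (M, min S cs) else (M, S)))

def reconstruct_file_py_alt (chunks : List (List (String × String))) : String :=
  if chunks = [] then ""
  else
    let unique := ((pvSortedChunks chunks).foldl pvStepB ([], none)).1
    let parts := unique.foldl
      (fun parts c => let t := pvContent c; if decide (t ≠ "") then parts ++ [t] else parts) []
    PySem.Str.join "\n\n" parts

-- ===== PRECONDITION & SPEC =====
def pvIntOk (c : List (String × String)) (k : String) : Bool :=
  match (PySem.Dict.mk c).get? k with
  | none => true
  | some v => (PySem.Int.ofStr? v).isSome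

-- Pre_ excludes exactly the inputs where int(...) raises ValueError in both Pythons:
-- a chunk whose 'start_line' or 'end_line' value is not an int-parseable string.
def Pre_reconstruct_file_py (chunks : List (List (String × String))) : Prop :=
  (chunks.all (fun c => pvIntOk c "start_line" && pvIntOk c "end_line")) = true

instance (chunks : List (List (String × String))) : Decidable (Pre_reconstruct_file_py chunks) := by
  unfold Pre_reconstruct_file_py; infer_instance

def pvWitness_reconstruct_file_py : (List (List (String × String))) :=
  [[("start_line", "1"), ("end_line", "5"), ("content", " whole ")],
   [("start_line", "2"), ("end_line", "3"), ("content", "inner")]]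

def Spec_reconstruct_file_py (chunks : List (List (String × String))) (out : String) : Prop :=
  out = reconstruct_file_py_alt chunks
instance (chunks : List (List (String × String))) (out : String) :
    Decidable (Spec_reconstruct_file_py chunks out) := by
  unfold Spec_reconstruct_file_py; infer_instance

-- ===== CLAIM (what is proved, stated in full; the proofs are below) =====
def Claim_equal_reconstruct_file_py : Prop :=
  ∀ (chunks : List (List (String × String))), Dom_reconstruct_file_py chunks →
    Pre_reconstruct_file_py chunks →
    Spec_reconstruct_file_py chunks (reconstruct_file_py chunks)

-- ===== LEMMAS AND PROOFS =====

-- a chunk sorted earlier under the key (start, -end)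
def pvLexLe (a b : List (String × String)) : Prop :=
  pvGetInt a "start_line" < pvGetInt b "start_line" ∨
  (pvGetInt a "start_line" = pvGetInt b "start_line" ∧
   pvGetInt b "end_line" ≤ pvGetInt a "end_line")

lemma pvSorted2_eq_sorted_lex (xs : List (List (String × String)))
    (k1 k2 : List (String × String) → Int) :
    PySem.List.sorted2 xs k1 k2 false =
      PySem.List.sorted xs (fun x => toLex (k1 x, k2 x)) false := by
  rw [PySem.List.sorted_eq_foldl_insertBy]
  show xs.foldl (fun acc x => PySem.List.insertBy _ x acc) [] = _
  congr 1
  funext acc x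
  congr 1
  funext a b
  rw [if_neg (by decide)]
  apply Bool.eq_iff_iff.mpr
  simp only [Bool.or_eq_true, Bool.and_eq_true, Bool.not_eq_true', decide_eq_true_eq,
    decide_eq_false_iff_not, Prod.Lex.lt_iff, ofLex_toLex]
  constructor <;> intro h <;> omega

lemma pvSortedChunks_pairwise (chunks : List (List (String × String))) :
    (pvSortedChunks chunks).Pairwise pvLexLe := by
  unfold pvSortedChunks
  rw [pvSorted2_eq_sorted_lex]
  refine (PySem.List.sorted_pairwise chunks
    (fun x => toLex (pvGetInt x "start_line", -(pvGetInt x "end_line")))).imp ?_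
  intro a b h
  rw [Prod.Lex.le_iff] at h
  simp only [ofLex_toLex] at h
  unfold pvLexLe
  omega

-- A's inner scan at c, as a Prop
lemma pvAny_cont_iff (u : List (List (String × String))) (c : List (String × String)) :
    (u.any (fun kept =>
      decide (pvGetInt kept "start_line" ≤ pvGetInt c "start_line" ∧
        pvGetInt c "end_line" ≤ pvGetInt kept "end_line" ∧
        (pvGetInt kept "start_line" ≠ pvGetInt c "start_line" ∨
         pvGetInt kept "end_line" ≠ pvGetInt c "end_line"))) = true) ↔
    (∃ k ∈ u, pvGetInt k "start_line" ≤ pvGetInt c "start_line" ∧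
      pvGetInt c "end_line" ≤ pvGetInt k "end_line" ∧
      (pvGetInt k "start_line" ≠ pvGetInt c "start_line" ∨
       pvGetInt k "end_line" ≠ pvGetInt c "end_line")) := by
  simp [List.any_eq_true]

-- main invariant: once (M, S) summarises the processed chunks, both loops keep the same list
lemma pvLoop_eq (l : List (List (String × String))) :
    ∀ (u : List (List (String × String))) (M S : Int),
    l.Pairwise pvLexLe →
    (∀ c ∈ l,
      ((∃ k ∈ u, pvGetInt k "start_line" ≤ pvGetInt c "start_line" ∧
        pvGetInt c "end_line" ≤ pvGetInt k "end_line" ∧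
        (pvGetInt k "start_line" ≠ pvGetInt c "start_line" ∨
         pvGetInt k "end_line" ≠ pvGetInt c "end_line")) ↔
       (pvGetInt c "end_line" < M ∨ (M = pvGetInt c "end_line" ∧ S < pvGetInt c "start_line")))) →
    l.foldl pvStepA u = (l.foldl pvStepB (u, some (M, S))).1 := by
  induction l with
  | nil => intro u M S _ _; rfl
  | cons c rest ih =>
    intro u M S hp hinv
    have hle : ∀ x ∈ rest, pvLexLe c x := (List.pairwise_cons.mp hp).1
    have hp' := (List.pairwise_cons.mp hp).2
    have hc := hinv c (List.mem_cons_self)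
    simp only [List.foldl_cons]
    by_cases hA : (∃ k ∈ u, pvGetInt k "start_line" ≤ pvGetInt c "start_line" ∧
        pvGetInt c "end_line" ≤ pvGetInt k "end_line" ∧
        (pvGetInt k "start_line" ≠ pvGetInt c "start_line" ∨
         pvGetInt k "end_line" ≠ pvGetInt c "end_line"))
    · -- contained: A skips c, B skips c and leaves (M, S) unchanged
      have hcond := hc.mp hA
      have hstepA : pvStepA u c = u := by
        unfold pvStepA; rw [if_pos ((pvAny_cont_iff u c).mpr hA)]
      have hstepB : pvStepB (u, some (M, S)) c = (u, some (M, S)) := by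
        unfold pvStepB
        simp only
        rw [if_pos (by simpa using hcond)]
        have h1 : ¬ (M < pvGetInt c "end_line") := by omega
        rw [if_neg h1]
        by_cases h2 : pvGetInt c "end_line" = M
        · rw [if_pos h2]
          have : min S (pvGetInt c "start_line") = S := by omega
          rw [this]
        · rw [if_neg h2]
      rw [hstepA, hstepB]
      exact ih u M S hp' (fun c' hc' => hinv c' (List.mem_cons_of_mem _ hc'))
    · -- kept: A appends c; B appends c and updates (M, S)
      have hcond := (not_iff_not.mpr hc).mp hA
      have hstepA : pvStepA u c = u ++ [c] := by
        unfold pvStepA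
        rw [if_neg (by rw [pvAny_cont_iff]; exact hA)]
      have hBfst : (pvStepB (u, some (M, S)) c).1 = u ++ [c] := by
        unfold pvStepB
        simp only
        rw [if_neg (by simp only [decide_eq_true_eq]; omega)]
      have hnew : ∀ c' ∈ rest,
          ((∃ k ∈ u ++ [c], pvGetInt k "start_line" ≤ pvGetInt c' "start_line" ∧
            pvGetInt c' "end_line" ≤ pvGetInt k "end_line" ∧
            (pvGetInt k "start_line" ≠ pvGetInt c' "start_line" ∨
             pvGetInt k "end_line" ≠ pvGetInt c' "end_line")) ↔
           ((∃ k ∈ u, pvGetInt k "start_line" ≤ pvGetInt c' "start_line" ∧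
            pvGetInt c' "end_line" ≤ pvGetInt k "end_line" ∧
            (pvGetInt k "start_line" ≠ pvGetInt c' "start_line" ∨
             pvGetInt k "end_line" ≠ pvGetInt c' "end_line")) ∨
            (pvGetInt c "start_line" ≤ pvGetInt c' "start_line" ∧
             pvGetInt c' "end_line" ≤ pvGetInt c "end_line" ∧
             (pvGetInt c "start_line" ≠ pvGetInt c' "start_line" ∨
              pvGetInt c "end_line" ≠ pvGetInt c' "end_line")))) := by
        intro c' _
        constructor
        · rintro ⟨k, hk, hkc⟩
          rcases List.mem_append.mp hk with h | h
          · exact Or.inl ⟨k, h, hkc⟩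
          · rw [List.mem_singleton.mp h] at hkc; exact Or.inr hkc
        · rintro (⟨k, hk, hkc⟩ | hcc)
          · exact ⟨k, List.mem_append_left _ hk, hkc⟩
          · exact ⟨c, List.mem_append_right _ (List.mem_singleton_self c), hcc⟩
      rw [hstepA]
      by_cases hgt : M < pvGetInt c "end_line"
      · -- running max grows
        have hstepB : pvStepB (u, some (M, S)) c =
            (u ++ [c], some (pvGetInt c "end_line", pvGetInt c "start_line")) := by
          unfold pvStepB
          simp only
          rw [if_neg (by simp only [decide_eq_true_eq]; omega), if_pos hgt]
        rw [hstepB]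
        refine ih (u ++ [c]) _ _ hp' ?_
        intro c' hc'
        rw [hnew c' hc', hinv c' (List.mem_cons_of_mem _ hc')]
        have := hle c' hc'
        unfold pvLexLe at this
        omega
      · -- same max, c starts no later than any chunk reaching it
        have heq : pvGetInt c "end_line" = M := by omega
        have hminS : min S (pvGetInt c "start_line") = pvGetInt c "start_line" := by omega
        have hstepB : pvStepB (u, some (M, S)) c =
            (u ++ [c], some (M, pvGetInt c "start_line")) := by
          unfold pvStepB
          simp only
          rw [if_neg (by simp only [decide_eq_true_eq]; omega), if_neg hgt, if_pos heq, hminS]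
        rw [hstepB]
        refine ih (u ++ [c]) _ _ hp' ?_
        intro c' hc'
        rw [hnew c' hc', hinv c' (List.mem_cons_of_mem _ hc')]
        have := hle c' hc'
        unfold pvLexLe at this
        omega

lemma pvLoop_eq_start (l : List (List (String × String))) (h : l.Pairwise pvLexLe) :
    l.foldl pvStepA [] = (l.foldl pvStepB ([], none)).1 := by
  cases l with
  | nil => rfl
  | cons c rest =>
    have hle : ∀ x ∈ rest, pvLexLe c x := (List.pairwise_cons.mp h).1
    simp only [List.foldl_cons]
    have hstepA : pvStepA [] c = [c] := by unfold pvStepA; simp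
    have hstepB : pvStepB ([], none) c =
        ([c], some (pvGetInt c "end_line", pvGetInt c "start_line")) := by
      unfold pvStepB; rfl
    rw [hstepA, hstepB]
    refine pvLoop_eq rest [c] _ _ (List.pairwise_cons.mp h).2 ?_
    intro c' hc'
    have := hle c' hc'
    unfold pvLexLe at this
    constructor
    · rintro ⟨k, hk, hkc⟩
      rw [List.mem_singleton.mp hk] at hkc
      omega
    · intro hcond
      refine ⟨c, (List.mem_singleton_self c), by omega⟩

-- B's output-collecting loop is A's map-then-filter
lemma pvParts_eq (unique : List (List (String × String))) :
    unique.foldl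
      (fun parts c => let t := pvContent c; if decide (t ≠ "") then parts ++ [t] else parts) [] =
    (unique.map pvContent).filter (fun s => decide (s ≠ "")) := by
  have h := PySem.List.foldl_append_if (l := unique)
    (p := fun c => decide (pvContent c ≠ "")) (f := pvContent) (acc := [])
  simp only at h
  rw [h, List.nil_append, List.filter_map]
  rfl

-- ===== VERDICT (by name: the statement is the Claim_ definition above) =====
theorem reconstruct_file_py_spec : Claim_equal_reconstruct_file_py := by
  intro chunks _ _
  unfold Spec_reconstruct_file_py reconstruct_file_py reconstruct_file_py_alt
  by_cases h : chunks = []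
  · rw [if_pos h, if_pos h]
  · rw [if_neg h, if_neg h]
    simp only
    rw [pvLoop_eq_start _ (pvSortedChunks_pairwise chunks), pvParts_eq]
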